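-- pv_equiv track=rewrite | github.com/sata-bench/sata-bench | src/satabench/methods/utils/debiasing.py | cantor_expansion
-- ===== SOURCE A (Python) =====
-- def cantor_expansion(p):
--     n = len(p)
--     code = 0
--     for i in range(n):
--         smaller_count = sum(1 for j in range(i+1, n) if p[j] < p[i])
--         if smaller_count > 0:
--             code += smaller_count * factorial(n - i - 1)
--     return code
--
-- def factorial(num):
--     if num == 0:
--         return 1
--     return num * factorial(num - 1)
-- ===== SOURCE B (Python) =====
-- def cantor_expansion(p):
--     # Right-to-left single pass: keep the already-seen suffix in a sorted list;
--     # the insertion position of x is the number of smaller elements to its right.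
--     # The factorial is built incrementally instead of recomputed recursively.
--     code = 0
--     fact = 1
--     k = 0
--     seen = []  # sorted ascending
--     for x in reversed(p):
--         pos = 0
--         while pos < len(seen) and seen[pos] < x:
--             pos += 1
--         code += pos * fact
--         seen.insert(pos, x)
--         k += 1
--         fact *= k
--     return code
-- ===== Notes on version B (the rewrite author's own statement) =====
-- stated objective: faster
-- what changed: Instead of, for every index, rescanning the whole tail and recomputing the factorial recursively, B makes one right-to-left pass maintaining a sorted list of the seen suffix (the insertion position is the smaller-count) and builds the factorial incrementally.
import Mathlib
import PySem

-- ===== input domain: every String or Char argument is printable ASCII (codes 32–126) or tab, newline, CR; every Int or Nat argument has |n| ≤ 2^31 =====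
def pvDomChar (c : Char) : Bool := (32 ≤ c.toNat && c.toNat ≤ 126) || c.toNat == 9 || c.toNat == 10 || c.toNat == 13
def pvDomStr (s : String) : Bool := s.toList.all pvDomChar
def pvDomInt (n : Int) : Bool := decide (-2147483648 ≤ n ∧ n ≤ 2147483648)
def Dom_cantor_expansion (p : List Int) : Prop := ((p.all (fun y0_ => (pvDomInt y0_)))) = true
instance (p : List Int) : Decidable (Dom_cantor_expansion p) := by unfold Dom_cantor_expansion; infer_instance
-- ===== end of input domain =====

-- B replaces A's per-index tail rescan and recursive factorial by one right-to-left pass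
-- over a maintained sorted list with an incrementally built factorial (constant-factor speed-up).

-- ===== PORT A =====
-- Python's factorial recursion; exact for num ≥ 0 (the only arguments A passes);
-- Python diverges for num < 0, where this returns 1 (unreachable from cantor_expansion).
def factorialA (num : Int) : Int :=
  if num ≤ 0 then 1 else num * factorialA (num - 1)
termination_by num.toNat
decreasing_by omega

def cantor_expansion (p : List Int) : Int :=
  let n : Int := PySem.List.len p
  (PySem.List.pyRange 0 n 1).foldl
    (fun code i =>
      let smaller_count : Int :=
        (PySem.List.pyRange (i + 1) n 1).foldl
          (fun acc j => acc + (if PySem.List.pyGetD p j 0 < PySem.List.pyGetD p i 0 then 1 else 0)) 0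
      if smaller_count > 0 then code + smaller_count * factorialA (n - i - 1) else code)
    0

-- ===== PORT B =====
-- the 'pos = 0; while pos < len(seen) and seen[pos] < x: pos += 1' scan of Source B:
-- length of the longest prefix of seen whose elements are < x (exact: the while
-- loop walks seen from the front and stops at the first element not < x)
def pvCountPos (seen : List Int) (x : Int) : Int :=
  match seen with
  | [] => 0
  | y :: t => if y < x then 1 + pvCountPos t x else 0

def cantor_expansion_alt (p : List Int) : Int :=
  (p.reverse.foldl
    (fun (st : Int × Int × List Int × Int) x =>
      let code := st.1
      let fact := st.2.1
      let seen := st.2.2.1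
      let k := st.2.2.2
      let pos := pvCountPos seen x
      (code + pos * fact, fact * (k + 1), PySem.List.insert seen pos x, k + 1))
    (0, 1, ([] : List Int), 0)).1

-- ===== PRECONDITION & SPEC =====
def Spec_cantor_expansion (p : List Int) (out : Int) : Prop := out = cantor_expansion_alt p
instance (p : List Int) (out : Int) : Decidable (Spec_cantor_expansion p out) := by unfold Spec_cantor_expansion; infer_instance

-- ===== CLAIM (what is proved, stated in full; the proofs are below) =====
def Claim_equal_cantor_expansion : Prop := ∀ (p : List Int), Dom_cantor_expansion p → Spec_cantor_expansion p (cantor_expansion p)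

-- ===== LEMMAS AND PROOFS =====

-- the common reference value: the Cantor rank, structurally
def pvRank : List Int → Int
  | [] => 0
  | x :: t => (t.countP (fun y => decide (y < x)) : Int) * factorialA (t.length : Int) + pvRank t

theorem factorialA_zero : factorialA 0 = 1 := by
  rw [factorialA]; simp

theorem factorialA_succ (k : Nat) : factorialA ((k : Int) + 1) = factorialA (k : Int) * ((k : Int) + 1) := by
  rw [factorialA]
  have h : ¬ ((k : Int) + 1 ≤ 0) := by omega
  rw [if_neg h]
  have h2 : (k : Int) + 1 - 1 = (k : Int) := by ring
  rw [h2, mul_comm]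

-- pvCountPos as a Nat
def pvCnt (s : List Int) (x : Int) : Nat :=
  match s with
  | [] => 0
  | y :: t => if y < x then 1 + pvCnt t x else 0

theorem pvCountPos_eq (s : List Int) (x : Int) : pvCountPos s x = (pvCnt s x : Int) := by
  induction s with
  | nil => rfl
  | cons y t ih =>
    simp only [pvCountPos, pvCnt]
    split_ifs <;> simp [ih]

theorem pvCnt_le (s : List Int) (x : Int) : pvCnt s x ≤ s.length := by
  induction s with
  | nil => simp [pvCnt]
  | cons y t ih =>
    simp only [pvCnt, List.length_cons]
    split_ifs <;> omega

theorem pvCnt_sorted (s : List Int) (x : Int) (h : List.Pairwise (· ≤ ·) s) :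
    pvCnt s x = s.countP (fun y => decide (y < x)) := by
  induction s with
  | nil => rfl
  | cons y t ih =>
    rw [List.pairwise_cons] at h
    simp only [pvCnt, List.countP_cons]
    by_cases hy : y < x
    · rw [if_pos hy, ih h.2]
      simp [hy]; omega
    · rw [if_neg hy]
      have ht : t.countP (fun y => decide (y < x)) = 0 := by
        rw [List.countP_eq_zero]
        intro z hz
        have := h.1 z hz
        simp only [decide_eq_true_eq]
        omega
      simp [ht, hy]

theorem insert_pvCountPos (s : List Int) (x : Int) :
    PySem.List.insert s (pvCountPos s x) x = List.orderedInsert (· ≤ ·) x s := by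
  induction s with
  | nil =>
    show PySem.List.insert [] 0 x = _
    rw [PySem.List.insert_zero]; rfl
  | cons y t ih =>
    simp only [pvCountPos, List.orderedInsert]
    by_cases hy : y < x
    · rw [if_pos hy, if_neg (by omega : ¬ x ≤ y)]
      rw [pvCountPos_eq]
      have h1 : (1 : Int) + (pvCnt t x : Int) = ((1 + pvCnt t x : Nat) : Int) := by push_cast; ring
      rw [h1, PySem.List.insert_natCast _ _ _ (by have := pvCnt_le t x; simp; omega)]
      have h2 : (1 + pvCnt t x) = pvCnt t x + 1 := by omega
      rw [h2, List.take_succ_cons, List.drop_succ_cons]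
      rw [pvCountPos_eq] at ih
      rw [PySem.List.insert_natCast _ _ _ (pvCnt_le t x)] at ih
      rw [List.cons_append, ih]
    · rw [if_neg hy, if_pos (by omega : x ≤ y), PySem.List.insert_zero]

-- the loop of B: invariant over the processed suffix
theorem Bloop (p : List Int) : ∃ s : List Int, List.Pairwise (· ≤ ·) s ∧ s.Perm p ∧
    p.reverse.foldl
      (fun (st : Int × Int × List Int × Int) x =>
        let code := st.1
        let fact := st.2.1
        let seen := st.2.2.1
        let k := st.2.2.2
        let pos := pvCountPos seen x
        (code + pos * fact, fact * (k + 1), PySem.List.insert seen pos x, k + 1))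
      (0, 1, ([] : List Int), 0)
    = (pvRank p, factorialA (p.length : Int), s, (p.length : Int)) := by
  induction p with
  | nil =>
    exact ⟨[], by simp, by simp, by simp [pvRank, factorialA_zero]⟩
  | cons x t ih =>
    obtain ⟨s, hs, hperm, heq⟩ := ih
    refine ⟨List.orderedInsert (· ≤ ·) x s, List.Pairwise.orderedInsert x s hs,
      ((List.perm_orderedInsert _ x s).trans (hperm.cons x)), ?_⟩
    rw [List.reverse_cons, List.foldl_append, heq]
    simp only [List.foldl_cons, List.foldl_nil]
    have hcnt : pvCountPos s x = (t.countP (fun y => decide (y < x)) : Int) := by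
      rw [pvCountPos_eq, pvCnt_sorted s x hs, hperm.countP_eq]
    refine Prod.ext ?_ (Prod.ext ?_ (Prod.ext ?_ ?_)) <;>
      simp only [pvRank, List.length_cons, hcnt]
    · ring
    · push_cast [factorialA_succ t.length]; ring_nf
    · rw [← hcnt, insert_pvCountPos]
    · push_cast; ring

theorem B_eq_rank (p : List Int) : cantor_expansion_alt p = pvRank p := by
  obtain ⟨s, _, _, heq⟩ := Bloop p
  unfold cantor_expansion_alt
  rw [heq]

-- A's inner generator sum counts the smaller elements of the tail
theorem foldl_sum_ite (X : Int) (l : List Int) (a : Int) :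
    l.foldl (fun acc y => acc + if y < X then 1 else 0) a
      = a + (l.countP (fun y => decide (y < X)) : Int) := by
  induction l generalizing a with
  | nil => simp
  | cons y t ih =>
    simp only [List.foldl_cons, List.countP_cons, ih]
    by_cases h : y < X <;> simp [h] <;> omega

theorem inner_eq (p : List Int) (i : Int) (h0 : 0 ≤ i) :
    (PySem.List.pyRange (i + 1) (PySem.List.len p) 1).foldl
        (fun acc j => acc + (if PySem.List.pyGetD p j 0 < PySem.List.pyGetD p i 0 then 1 else 0)) 0
      = ((p.drop (i.toNat + 1)).countP (fun y => decide (y < PySem.List.pyGetD p i 0)) : Int) := by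
  rw [PySem.List.foldl_pyRange_pyGetD p 0
    (fun acc y => acc + if y < PySem.List.pyGetD p i 0 then 1 else 0) 0 (by omega : (0:Int) ≤ i + 1)]
  have h : (i + 1).toNat = i.toNat + 1 := by omega
  rw [h, foldl_sum_ite]
  ring

-- the sum A computes, in Nat-indexed form
def pvSA (p : List Int) : Int :=
  ((List.range p.length).map (fun k =>
    ((p.drop (k + 1)).countP (fun y => decide (y < p.getD k 0)) : Int)
      * factorialA ((p.length : Int) - (k : Int) - 1))).sum

theorem A_eq_SA (p : List Int) : cantor_expansion p = pvSA p := by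
  unfold cantor_expansion
  simp only []
  rw [PySem.List.foldl_congr_mem _ _
    (fun code i => code +
      ((p.drop (i.toNat + 1)).countP (fun y => decide (y < PySem.List.pyGetD p i 0)) : Int)
        * factorialA (PySem.List.len p - i - 1)) 0 ?_]
  · rw [PySem.List.foldl_add]
    rw [PySem.List.pyRange_one, List.map_map]
    unfold pvSA
    have hlen : (PySem.List.len p - 0).toNat = p.length := by
      rw [PySem.List.len_eq]; omega
    rw [hlen, zero_add]
    congr 1
    apply List.map_congr_left
    intro k _
    simp only [Function.comp_apply, zero_add, Int.toNat_natCast, PySem.List.pyGetD_natCast,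
      PySem.List.len_eq]
  · intro acc i hi
    rw [PySem.List.mem_pyRange_one] at hi
    beta_reduce
    rw [inner_eq p i hi.1]
    have hnn : (0 : Int) ≤ ((p.drop (i.toNat + 1)).countP (fun y => decide (y < PySem.List.pyGetD p i 0)) : Int) := by positivity
    split_ifs with h
    · rfl
    · have : ((p.drop (i.toNat + 1)).countP (fun y => decide (y < PySem.List.pyGetD p i 0)) : Int) = 0 := by omega
      rw [this]; ring

theorem SA_eq_rank (p : List Int) : pvSA p = pvRank p := by
  induction p with
  | nil => rfl
  | cons x t ih =>
    unfold pvSA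
    rw [List.length_cons, List.range_succ_eq_map, List.map_cons, List.map_map, List.sum_cons]
    have hmap : (List.range t.length).map ((fun k =>
          (((x :: t).drop (k + 1)).countP (fun y => decide (y < (x :: t).getD k 0)) : Int)
            * factorialA (((t.length + 1 : Nat) : Int) - (k : Int) - 1)) ∘ Nat.succ)
        = (List.range t.length).map (fun k =>
          ((t.drop (k + 1)).countP (fun y => decide (y < t.getD k 0)) : Int)
            * factorialA ((t.length : Int) - (k : Int) - 1)) := by
      apply List.map_congr_left
      intro k _
      simp only [Function.comp_apply, Nat.succ_eq_add_one, List.drop_succ_cons, List.getD_cons_succ]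
      congr 1
      congr 1
      push_cast
      ring
    rw [hmap]
    show _ + pvSA t = _
    rw [ih]
    simp only [pvRank, List.drop_succ_cons, List.drop_zero, List.getD_cons_zero]
    congr 2
    push_cast
    ring

-- ===== VERDICT (by name: the statement is the Claim_ definition above) =====
theorem cantor_expansion_spec : Claim_equal_cantor_expansion := by
  intro p _
  unfold Spec_cantor_expansion
  rw [A_eq_SA, SA_eq_rank, B_eq_rank]
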